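-- pv_equiv track=rewrite | github.com/leon-matthews/animal3 | animal3/forms/utils.py | collapse_errors
-- ===== SOURCE A (Python) =====
-- import collections
-- from typing import Any, Dict, List, Mapping, Optional, Set, Union
--
-- def collapse_errors(errors: Dict[str, List[str]]) -> List[str]:
--     """
--     Collapse a dictionary of similar form errors into a flat list.
--
--     Some editing of the messages also takes place for clarity.
--
--     For example:
--
--         >>> collapse_errors({'name': ['This field is required.'],
--         ... 'slug': ['This field is required.']})
--         ['Required fields missing: name, slug']
--
--     Args:
--         errors:
--             A dictionary of Django form errors from, eg. 'form.errors'
--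
--     Returns:
--         A flat list of error strings.
--     """
--     # Message replacements
--     replacements = {
--         'This field is required': 'Required fields missing',
--     }
--
--     # Invert the error dictionary
--     inverted = collections.defaultdict(set)
--     for field, messages in errors.items():
--         for message in messages:
--             inverted[message].add(field)
--
--     # Build output messages
--     def pset(keys: Set[str]) -> str:
--         return ", ".join(sorted(keys))
--
--     output = []
--     for message, fields in inverted.items():
--         message = message.strip('.')
--         message = replacements.get(message, message)
--         output.append(f"{message}: {pset(fields)}")
--     return sorted(output)
-- ===== SOURCE B (Python) =====
-- def collapse_errors(errors):
--     """Collapse a dictionary of form errors into a flat, sorted list of strings."""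
--     replacements = {
--         'This field is required': 'Required fields missing',
--     }
--     # Flatten into a deduplicated set of (message, field) pairs
--     pairs = {(m, f) for f, msgs in errors.items() for m in msgs}
--     out = []
--     for msg in sorted({m for m, _ in pairs}):
--         fields = sorted(f for m, f in pairs if m == msg)
--         text = msg.strip('.')
--         text = replacements.get(text, text)
--         out.append(f"{text}: {', '.join(fields)}")
--     return sorted(out)
-- ===== Notes on version B (the rewrite author's own statement) =====
-- stated objective: alternative
-- what changed: B drops A's defaultdict(set) inversion entirely: it flattens the errors dict into one deduplicated set of (message, field) pairs and then, for each distinct message taken in sorted order, filters that pair set to collect the message's fields, so no dictionary is built at all (trades A's single-pass grouping for a per-message scan of the pair set).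
import Mathlib
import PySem

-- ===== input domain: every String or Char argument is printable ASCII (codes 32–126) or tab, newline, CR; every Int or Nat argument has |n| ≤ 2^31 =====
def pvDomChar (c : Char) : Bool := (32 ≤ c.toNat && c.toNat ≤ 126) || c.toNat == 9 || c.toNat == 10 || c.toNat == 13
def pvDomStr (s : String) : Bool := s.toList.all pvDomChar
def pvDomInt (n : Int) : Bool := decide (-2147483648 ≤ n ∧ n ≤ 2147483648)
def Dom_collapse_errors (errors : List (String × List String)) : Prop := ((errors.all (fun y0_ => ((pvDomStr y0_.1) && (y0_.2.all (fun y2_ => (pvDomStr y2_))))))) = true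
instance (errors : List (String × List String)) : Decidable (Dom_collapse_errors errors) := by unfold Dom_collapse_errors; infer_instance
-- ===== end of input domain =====

-- B replaces A's defaultdict(set) inversion by a flat deduplicated (message, field)
-- pair set scanned per sorted message (objective: alternative decomposition, same result).

-- ===== PORT A =====
def collapse_errors (errors : List (String × List String)) : List String :=
  -- inverted = defaultdict(set); for field, messages in errors.items(): for message in messages: inverted[message].add(field)
  let inverted : PySem.Dict String (PySem.Set String) :=
    errors.foldl (fun d fm =>
      fm.2.foldl (fun d message => d.modify message PySem.Set.empty (fun s => PySem.Set.add s fm.1)) d)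
      PySem.Dict.empty
  -- for message, fields in inverted.items(): strip '.', apply replacements, append "message: field, field"
  let output : List String :=
    inverted.items.foldl (fun out mf =>
      let message := PySem.Str.stripChars mf.1 "."
      let message := (PySem.Dict.mk [("This field is required", "Required fields missing")]).getD message message
      out ++ [message ++ ": " ++ PySem.Str.join ", " (PySem.List.sorted mf.2 (fun x => x) false)]) []
  PySem.List.sorted output (fun x => x) false

-- ===== PORT B =====
def collapse_errors_alt (errors : List (String × List String)) : List String :=
  -- pairs = {(m, f) for f, msgs in errors.items() for m in msgs}
  let pairs : PySem.Set (String × String) :=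
    PySem.Set.ofList (errors.flatMap (fun fm => fm.2.map (fun m => (m, fm.1))))
  -- for msg in sorted({m for m, _ in pairs}): filter pairs, strip '.', apply replacements, append the line
  let out : List String :=
    (PySem.List.sorted (PySem.Set.ofList (pairs.map Prod.fst)) (fun x => x) false).foldl
      (fun out msg =>
        let fields := PySem.List.sorted ((pairs.filter (fun p => p.1 == msg)).map Prod.snd) (fun x => x) false
        let text := PySem.Str.stripChars msg "."
        let text := (PySem.Dict.mk [("This field is required", "Required fields missing")]).getD text text
        out ++ [text ++ ": " ++ PySem.Str.join ", " fields]) []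
  PySem.List.sorted out (fun x => x) false

-- ===== PRECONDITION & SPEC =====
def Spec_collapse_errors (errors : List (String × List String)) (out : List String) : Prop := out = collapse_errors_alt errors
instance (errors : List (String × List String)) (out : List String) : Decidable (Spec_collapse_errors errors out) := by unfold Spec_collapse_errors; infer_instance

-- ===== CLAIM (what is proved, stated in full; the proofs are below) =====
def Claim_equal_collapse_errors : Prop := ∀ (errors : List (String × List String)), Dom_collapse_errors errors → Spec_collapse_errors errors (collapse_errors errors)

-- ===== LEMMAS AND PROOFS =====

-- The edited output line for raw message m and field list fs (fs is sorted inside).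
def pvLine (m : String) (fs : List String) : String :=
  let t := PySem.Str.stripChars m "."
  let t := (PySem.Dict.mk [("This field is required", "Required fields missing")]).getD t t
  t ++ ": " ++ PySem.Str.join ", " (PySem.List.sorted fs (fun x => x) false)

-- All (message, field) pairs, in A's traversal order.
def pvPairs (errors : List (String × List String)) : List (String × String) :=
  errors.flatMap (fun fm => fm.2.map (fun m => (m, fm.1)))

lemma pv_ofList_append {α : Type} [BEq α] (l : List α) (x : α) :
    PySem.Set.ofList (l ++ [x]) = PySem.Set.add (PySem.Set.ofList l) x := by
  simp [PySem.Set.ofList_eq_foldl, List.foldl_append]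

lemma pv_ofList_map {α β : Type} [BEq α] [LawfulBEq α] [BEq β] [LawfulBEq β]
    (f : α → β) (l : List α) :
    PySem.Set.ofList ((PySem.Set.ofList l).map f) = PySem.Set.ofList (l.map f) := by
  induction l using List.reverseRecOn with
  | nil => rfl
  | append_singleton t x ih =>
    rw [pv_ofList_append, List.map_append, List.map_singleton, pv_ofList_append]
    by_cases hx : x ∈ PySem.Set.ofList t
    · have h1 : PySem.Set.add (PySem.Set.ofList t) x = PySem.Set.ofList t := by
        simp [PySem.Set.add, hx]
      have hfx : f x ∈ PySem.Set.ofList (List.map f t) := by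
        rw [PySem.Set.mem_ofList]
        exact List.mem_map_of_mem ((PySem.Set.mem_ofList t x).mp hx)
      rw [h1, ih]
      simp [PySem.Set.add, hfx]
    · have h1 : PySem.Set.add (PySem.Set.ofList t) x = PySem.Set.ofList t ++ [x] := by
        simp [PySem.Set.add, hx]
      rw [h1, List.map_append, List.map_singleton, pv_ofList_append, ih]

lemma pv_filter_ofList {α : Type} [BEq α] [LawfulBEq α] (q : α → Bool) (l : List α) :
    (PySem.Set.ofList l).filter q = PySem.Set.ofList (l.filter q) := by
  induction l using List.reverseRecOn with
  | nil => rfl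
  | append_singleton t x ih =>
    rw [pv_ofList_append, List.filter_append, List.filter_singleton]
    by_cases hx : x ∈ PySem.Set.ofList t
    · have hmem : x ∈ t := (PySem.Set.mem_ofList t x).mp hx
      have h1 : PySem.Set.add (PySem.Set.ofList t) x = PySem.Set.ofList t := by
        simp [PySem.Set.add, hx]
      rw [h1, ih]
      by_cases hq : q x
      · have hxf : x ∈ PySem.Set.ofList (t.filter q) :=
          (PySem.Set.mem_ofList _ _).mpr (List.mem_filter.mpr ⟨hmem, hq⟩)
        simp only [hq, cond_true]
        rw [pv_ofList_append]
        simp [PySem.Set.add, hxf]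
      · simp only [hq, cond_false, List.append_nil]
    · have h1 : PySem.Set.add (PySem.Set.ofList t) x = PySem.Set.ofList t ++ [x] := by
        simp [PySem.Set.add, hx]
      rw [h1, List.filter_append, List.filter_singleton, ih]
      by_cases hq : q x
      · have hxf : ¬ x ∈ PySem.Set.ofList (t.filter q) := fun hc =>
          hx ((PySem.Set.mem_ofList t x).mpr (List.mem_filter.mp ((PySem.Set.mem_ofList _ _).mp hc)).1)
        simp only [hq, cond_true]
        rw [pv_ofList_append]
        simp [PySem.Set.add, hxf]
      · simp only [hq, cond_false, List.append_nil]

lemma pv_map_snd_ofList {α β : Type} [BEq α] [LawfulBEq α] [BEq β] [LawfulBEq β]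
    (m : α) (l : List (α × β)) (h : ∀ p ∈ l, p.1 = m) :
    (PySem.Set.ofList l).map Prod.snd = PySem.Set.ofList (l.map Prod.snd) := by
  induction l using List.reverseRecOn with
  | nil => rfl
  | append_singleton t x ih =>
    have ht : ∀ p ∈ t, p.1 = m := fun p hp => h p (List.mem_append_left _ hp)
    have hx1 : x.1 = m := h x (List.mem_append_right _ (List.mem_singleton_self x))
    rw [pv_ofList_append, List.map_append, List.map_singleton, pv_ofList_append]
    by_cases hx : x ∈ PySem.Set.ofList t
    · have h1 : PySem.Set.add (PySem.Set.ofList t) x = PySem.Set.ofList t := by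
        simp [PySem.Set.add, hx]
      have hx2 : x.2 ∈ PySem.Set.ofList (t.map Prod.snd) :=
        (PySem.Set.mem_ofList _ _).mpr (List.mem_map_of_mem ((PySem.Set.mem_ofList t x).mp hx))
      rw [h1, ih ht]
      simp [PySem.Set.add, hx2]
    · have h1 : PySem.Set.add (PySem.Set.ofList t) x = PySem.Set.ofList t ++ [x] := by
        simp [PySem.Set.add, hx]
      have hx2 : ¬ x.2 ∈ PySem.Set.ofList (t.map Prod.snd) := by
        intro hc
        rcases List.mem_map.mp ((PySem.Set.mem_ofList _ _).mp hc) with ⟨p, hp, hps⟩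
        have : p = x := Prod.ext ((ht p hp).trans hx1.symm) hps
        exact hx ((PySem.Set.mem_ofList t x).mpr (this ▸ hp))
      rw [h1, List.map_append, List.map_singleton, ih ht]
      simp [PySem.Set.add, hx2]

lemma pv_getD_fold (l : List (String × String)) (d : PySem.Dict String (PySem.Set String)) (m : String) :
    (l.foldl (fun d p => d.modify p.1 ([] : PySem.Set String) (fun s => PySem.Set.add s p.2)) d).getD m []
      = ((l.filter (fun p => p.1 == m)).map Prod.snd).foldl PySem.Set.add (d.getD m []) := by
  induction l generalizing d with
  | nil => rfl
  | cons a t ih =>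
    simp only [List.foldl_cons]
    rw [ih]
    by_cases ha : a.1 = m
    · have hm : (d.modify a.1 ([] : PySem.Set String) (fun s => PySem.Set.add s a.2)).getD m []
          = PySem.Set.add (d.getD m []) a.2 := by
        rw [PySem.Dict.getD_modify]; simp [ha]
      rw [List.filter_cons, if_pos (by simp [ha]), List.map_cons, List.foldl_cons, hm]
    · have hm : (d.modify a.1 ([] : PySem.Set String) (fun s => PySem.Set.add s a.2)).getD m []
          = d.getD m [] := by
        rw [PySem.Dict.getD_modify]; simp [Ne.symm ha]
      rw [List.filter_cons, if_neg (by simp [ha]), hm]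

lemma pv_items_eq {κ ν : Type} [BEq κ] [LawfulBEq κ] (d : PySem.Dict κ ν) (h : d.keys.Nodup) (v0 : ν) :
    d.items = d.keys.map (fun k => (k, d.getD k v0)) := by
  apply List.ext_getElem
  · simp [PySem.Dict.keys]
  · intro i h1 h2
    have hk : d.keys[i]'(by simpa [PySem.Dict.keys] using h1) = (d.items[i]'h1).1 := by
      simp [PySem.Dict.keys]
    simp only [List.getElem_map]
    rw [hk]
    have hmem : d.items[i]'h1 ∈ d.items := List.getElem_mem h1
    have := PySem.Dict.getD_of_mem_items d (k := (d.items[i]'h1).1) (v := (d.items[i]'h1).2)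
      (by exact hmem) h v0
    rw [this]

lemma pv_A_closed (errors : List (String × List String)) :
    collapse_errors errors
      = PySem.List.sorted
          ((PySem.Set.ofList ((pvPairs errors).map Prod.fst)).map
            (fun m => pvLine m (PySem.Set.ofList (((pvPairs errors).filter (fun p => p.1 == m)).map Prod.snd))))
          (fun x => x) false := by
  have h0 : collapse_errors errors
      = PySem.List.sorted
          ((errors.foldl (fun d fm =>
              fm.2.foldl (fun d message => d.modify message ([] : PySem.Set String) (fun s => PySem.Set.add s fm.1)) d)
              PySem.Dict.empty).items.foldl
            (fun out mf => out ++ [pvLine mf.1 mf.2]) [])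
          (fun x => x) false := rfl
  have hd : errors.foldl (fun d fm =>
        fm.2.foldl (fun d message => d.modify message ([] : PySem.Set String) (fun s => PySem.Set.add s fm.1)) d)
        PySem.Dict.empty
      = (pvPairs errors).foldl
          (fun d p => d.modify p.1 ([] : PySem.Set String) (fun s => PySem.Set.add s p.2)) PySem.Dict.empty := by
    rw [pvPairs, List.foldl_flatMap]
    exact PySem.List.foldl_congr_mem errors _ _ _ (fun d fm _ => by rw [List.foldl_map])
  rw [h0, hd]
  set D := (pvPairs errors).foldl
    (fun d p => d.modify p.1 ([] : PySem.Set String) (fun s => PySem.Set.add s p.2)) PySem.Dict.empty with hD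
  have hkeys : D.keys = PySem.Set.ofList ((pvPairs errors).map Prod.fst) := by
    rw [hD, PySem.Dict.keys_foldl_modify_key (pvPairs errors) Prod.fst ([] : PySem.Set String)
      (fun d p => fun s => PySem.Set.add s p.2) PySem.Dict.empty, PySem.Dict.keys_empty,
      PySem.Set.ofList_eq_foldl]
    rfl
  have hnodup : D.keys.Nodup := by
    rw [hD]
    exact PySem.Dict.nodup_keys_foldl_modify_key _ _ _ _ _ PySem.Dict.nodup_keys_empty
  have hgetD : ∀ m, D.getD m []
      = PySem.Set.ofList (((pvPairs errors).filter (fun p => p.1 == m)).map Prod.snd) := by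
    intro m
    rw [hD, pv_getD_fold, PySem.Dict.getD_empty, PySem.Set.ofList_eq_foldl]
  rw [pv_items_eq D hnodup [], List.foldl_map,
    PySem.List.foldl_append_singleton_eq_map (f := fun k => pvLine k (D.getD k [])) D.keys []]
  rw [List.nil_append, hkeys]
  congr 1
  exact List.map_congr_left (fun m _ => by rw [hgetD m])

lemma pv_B_closed (errors : List (String × List String)) :
    collapse_errors_alt errors
      = PySem.List.sorted
          ((PySem.List.sorted (PySem.Set.ofList ((pvPairs errors).map Prod.fst)) (fun x => x) false).map
            (fun m => pvLine m (PySem.Set.ofList (((pvPairs errors).filter (fun p => p.1 == m)).map Prod.snd))))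
          (fun x => x) false := by
  have h0 : collapse_errors_alt errors
      = PySem.List.sorted
          ((PySem.List.sorted (PySem.Set.ofList ((PySem.Set.ofList (pvPairs errors)).map Prod.fst)) (fun x => x) false).foldl
            (fun out msg => out ++ [pvLine msg (((PySem.Set.ofList (pvPairs errors)).filter (fun p => p.1 == msg)).map Prod.snd)]) [])
          (fun x => x) false := rfl
  rw [h0, pv_ofList_map Prod.fst (pvPairs errors),
    PySem.List.foldl_append_singleton_eq_map
      (f := fun msg => pvLine msg (((PySem.Set.ofList (pvPairs errors)).filter (fun p => p.1 == msg)).map Prod.snd)),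
    List.nil_append]
  congr 1
  apply List.map_congr_left
  intro m _
  have hall : ∀ p ∈ (pvPairs errors).filter (fun p => p.1 == m), p.1 = m := by
    intro p hp
    exact eq_of_beq (List.mem_filter.mp hp).2
  rw [pv_filter_ofList (fun p => p.1 == m) (pvPairs errors), pv_map_snd_ofList m _ hall]

theorem collapse_errors_spec : Claim_equal_collapse_errors := by
  intro errors _
  show collapse_errors errors = collapse_errors_alt errors
  rw [pv_A_closed, pv_B_closed, PySem.List.sorted_id_eq_sorted_id_iff_perm]
  exact (List.Perm.map _ (PySem.List.sorted_perm _ _ _)).symm
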